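-- pv_equiv track=rewrite | github.com/Rownita/Python_MOOC_23_Fin | Everything_reversed.py | everything_reversed
-- ===== SOURCE A (Python) =====
-- def everything_reversed(my_list):
--   list_2 = []
--   j = len(my_list)-1
--   #reversing element of a list
--   for i in my_list:
--     k=i[::-1]
--     list_2.append(k)
--   #reversing a list
--   list_3 = []
--   while j >= 0:
--       a = list_2[j]
--       list_3.append(a)
--       j=j-1
--
--   return list_3
-- ===== SOURCE B (Python) =====
-- def everything_reversed(my_list):
--     result = []
--     for s in my_list:
--         rev = ''
--         for ch in s:
--             rev = ch + rev
--         result = [rev] + result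
--     return result
-- ===== Notes on version B (the rewrite author's own statement) =====
-- stated objective: alternative
-- what changed: A makes two staged passes (build an intermediate list of slice-reversed elements, then copy it out with a descending-index while loop); B is one forward pass that reverses each string character by character with a prepend accumulator and prepends each result to the output list, so the final order emerges from the accumulator with no slicing, no intermediate list and no index arithmetic.
import Mathlib
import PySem

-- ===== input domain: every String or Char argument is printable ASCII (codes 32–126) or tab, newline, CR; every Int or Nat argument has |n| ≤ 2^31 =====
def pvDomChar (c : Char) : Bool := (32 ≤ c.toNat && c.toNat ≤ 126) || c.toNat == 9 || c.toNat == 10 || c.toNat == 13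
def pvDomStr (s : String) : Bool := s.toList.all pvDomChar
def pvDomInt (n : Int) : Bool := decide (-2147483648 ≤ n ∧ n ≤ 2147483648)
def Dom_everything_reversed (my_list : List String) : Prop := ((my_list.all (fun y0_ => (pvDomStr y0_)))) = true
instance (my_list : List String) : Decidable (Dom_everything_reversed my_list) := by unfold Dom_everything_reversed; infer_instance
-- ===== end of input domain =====

-- B replaces A's two staged passes (slice-reverse each element into an intermediate list,
-- then copy it out with a descending-index while loop) by one forward pass that reverses each
-- string character by character and prepends each result to the output; objective: alternative.

-- ===== PORT A =====
-- s[::-1] for a string (exact: PySem.Str.slice? with step -1; never none here)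
def pyStrRev (s : String) : String := (PySem.Str.slice? s none none (-1)).getD ""

-- for i in my_list: list_2.append(i[::-1])
def aBuildList2 (my_list : List String) : List String :=
  my_list.foldl (fun acc i => acc ++ [pyStrRev i]) []

-- while j >= 0: list_3.append(list_2[j]); j = j-1   (called with fuel j+1; element j = fuel-1 first)
def aWhileLoop (list_2 : List String) : Nat → List String
  | 0 => []
  | n + 1 => ((PySem.List.pyGet? list_2 (n : Int)).getD "") :: aWhileLoop list_2 n

def everything_reversed (my_list : List String) : List String :=
  aWhileLoop (aBuildList2 my_list) my_list.length

-- ===== PORT B =====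
-- rev = ''; for ch in s: rev = ch + rev    (char prepend, ported on List Char)
def bRevStr (s : String) : String :=
  String.ofList (s.toList.foldl (fun r c => c :: r) [])

-- result = [rev] + result, one forward pass over my_list
def everything_reversed_alt (my_list : List String) : List String :=
  my_list.foldl (fun result s => bRevStr s :: result) []

-- ===== PRECONDITION & SPEC =====
def Spec_everything_reversed (my_list : List String) (out : List String) : Prop := out = everything_reversed_alt my_list
instance (my_list : List String) (out : List String) : Decidable (Spec_everything_reversed my_list out) := by unfold Spec_everything_reversed; infer_instance

-- ===== CLAIM (what is proved, stated in full; the proofs are below) =====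
def Claim_equal_everything_reversed : Prop := ∀ (my_list : List String), Dom_everything_reversed my_list → Spec_everything_reversed my_list (everything_reversed my_list)

-- ===== LEMMAS AND PROOFS =====
theorem bRevStr_eq_pyStrRev (s : String) : bRevStr s = pyStrRev s := by
  simp [bRevStr, pyStrRev, PySem.Str.slice?_none_none_neg_one]

theorem alt_foldl_general (l acc : List String) :
    l.foldl (fun result s => bRevStr s :: result) acc = (l.map pyStrRev).reverse ++ acc := by
  induction l generalizing acc with
  | nil => rfl
  | cons x xs ih =>
    rw [List.foldl_cons, ih, List.map_cons, List.reverse_cons, List.append_assoc,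
      List.singleton_append, bRevStr_eq_pyStrRev]

theorem alt_eq_reverse_map (my_list : List String) :
    everything_reversed_alt my_list = (my_list.map pyStrRev).reverse := by
  rw [everything_reversed_alt, alt_foldl_general, List.append_nil]

theorem aBuildList2_eq (my_list : List String) :
    aBuildList2 my_list = my_list.map pyStrRev := by
  suffices h : ∀ (l : List String) (acc : List String),
      l.foldl (fun acc i => acc ++ [pyStrRev i]) acc = acc ++ l.map pyStrRev by
    simpa [aBuildList2] using h my_list []
  intro l
  induction l with
  | nil => simp
  | cons x xs ih => intro acc; simp [List.foldl, ih]

theorem aWhileLoop_eq (l2 : List String) :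
    ∀ n, n ≤ l2.length → aWhileLoop l2 n = (l2.take n).reverse := by
  intro n
  induction n with
  | zero => simp [aWhileLoop]
  | succ n ih =>
    intro h
    have hn : n < l2.length := h
    have htake : List.take (n + 1) l2 = List.take n l2 ++ [l2[n]] := by
      rw [List.take_add_one, List.getElem?_eq_getElem hn, Option.toList_some]
    show ((PySem.List.pyGet? l2 (n : Int)).getD "") :: aWhileLoop l2 n = _
    rw [ih (Nat.le_of_lt hn), PySem.List.pyGet?_natCast, List.getElem?_eq_getElem hn,
      htake, List.reverse_append, Option.getD_some, List.reverse_singleton,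
      List.singleton_append]

-- ===== VERDICT (by name: the statement is the Claim_ definition above) =====
theorem everything_reversed_spec : Claim_equal_everything_reversed := by
  intro my_list _
  unfold Spec_everything_reversed everything_reversed
  rw [aBuildList2_eq, aWhileLoop_eq _ my_list.length (by simp), alt_eq_reverse_map]
  rw [show my_list.length = (my_list.map pyStrRev).length by simp, List.take_length]
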